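-- pv_equiv track=rewrite | github.com/mrdavenguyen/Waffle-Solver | live_solver.py | determine_letter_pool_allocation
-- ===== SOURCE A (Python) =====
-- def determine_letter_pool_allocation(tile_position, current_tile, intersections, board_layout) -> list:
--     """
--     This function will take a tile and based off index in current line, color, and intersections, return
--     a list of lines that this tile's letter can be added to it's pool of letter options.
--
--     Index 0, 2, 4:
--     --------------
--     Yellow = Letter poshsible in eiter current line or line intersection only.
--     Grey = Letter not in current line or line intersection at index. All other lines possible
--
--
--     Index 1, 3:
--     -------------
--     Yellow = Letter in current line only.
--     Grey = Letter not in current line, or start or ending intersection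
--
--     """
--     positions = [i for i in range(25) if i not in [6, 8, 16, 18]]
--
--     tile_position = tile_position
--     color = current_tile["color"]
--
--     relational_positions = []
--
--     for row_or_col in board_layout: #loops through the lines of the board
--         current_line = board_layout[row_or_col]
--
--         if tile_position in current_line: #if this tile in in the line (row or col)
--             for position in current_line: #loops through every tile in lineSoo
--                 if color == "yellow":
--                     if position != tile_position: #if not the current tile, then add it to related positions
--                         relational_positions.append(position)
--                 else: #white
--                     if position in positions: #removes any related tile in current line or intersections
--                         positions.remove(position)
--
--     if color != "yellow":
--         relational_positions = positions
--
--     return relational_positions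
-- ===== SOURCE B (Python) =====
-- def determine_letter_pool_allocation(tile_position, current_tile, intersections, board_layout) -> list:
--     # Inverted index: position -> ordered list of the keys of the lines containing it.
--     index = {}
--     for key in board_layout:
--         for p in board_layout[key]:
--             lines = index.setdefault(p, [])
--             if key not in lines:
--                 lines.append(key)
--     tile_lines = index.get(tile_position, [])
--     if current_tile["color"] == "yellow":
--         return [p for key in tile_lines
--                   for p in board_layout[key] if p != tile_position]
--     tls = set(tile_lines)
--     return [p for p in range(25)
--               if p not in (6, 8, 16, 18) and tls.isdisjoint(index.get(p, []))]
-- ===== Notes on version B (the rewrite author's own statement) =====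
-- stated objective: alternative
-- what changed: B builds an inverted index position->list-of-line-keys once, reads the tile's line set off the index, and answers by walking those lines (yellow) or by keeping each fixed position whose indexed line set is disjoint from the tile's (white), instead of A's scan over lines with an in-loop color test and destructive positions.remove; Pre_ excludes inputs whose current_tile lacks a "color" key (A raises KeyError) and assoc lists with duplicate board_layout keys, which no Python dict can represent.
import Mathlib
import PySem

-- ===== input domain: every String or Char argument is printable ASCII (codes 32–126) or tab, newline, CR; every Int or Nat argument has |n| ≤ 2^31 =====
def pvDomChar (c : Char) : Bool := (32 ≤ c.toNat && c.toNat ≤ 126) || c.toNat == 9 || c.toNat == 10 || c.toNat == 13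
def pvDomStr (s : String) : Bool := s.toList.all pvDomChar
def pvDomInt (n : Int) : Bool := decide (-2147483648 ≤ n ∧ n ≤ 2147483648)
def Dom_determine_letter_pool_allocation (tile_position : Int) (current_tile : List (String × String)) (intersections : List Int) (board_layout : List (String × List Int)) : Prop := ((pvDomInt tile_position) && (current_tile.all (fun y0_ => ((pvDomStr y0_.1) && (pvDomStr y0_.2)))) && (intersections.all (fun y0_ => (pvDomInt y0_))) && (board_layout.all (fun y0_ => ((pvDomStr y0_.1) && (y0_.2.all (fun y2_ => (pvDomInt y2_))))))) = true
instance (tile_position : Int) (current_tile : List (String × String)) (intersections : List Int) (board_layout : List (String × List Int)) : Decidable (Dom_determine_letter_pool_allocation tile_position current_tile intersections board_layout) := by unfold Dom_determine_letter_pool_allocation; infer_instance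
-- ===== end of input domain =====

-- ===== PORT A =====
-- B replaces A's scan over lines (color test in the inner loop, destructive positions.remove)
-- by an inverted position→line-keys index built once; yellow walks the tile's lines through the
-- index, white keeps each fixed position whose indexed line set is disjoint from the tile's
-- (objective: alternative).
def determine_letter_pool_allocation (tile_position : Int) (current_tile : List (String × String)) (intersections : List Int) (board_layout : List (String × List Int)) : List Int :=
  let positions : List Int :=
    (PySem.List.pyRange 0 25 1).filter (fun i => !(([6, 8, 16, 18] : List Int).contains i))
  let color : String := ((PySem.Dict.mk current_tile).get? "color").getD ""  -- Pre_ guarantees the key is present (else Python raises KeyError)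
  let st : List Int × List Int :=
    board_layout.foldl (fun (st : List Int × List Int) kv =>
      let current_line : List Int := ((PySem.Dict.mk board_layout).get? kv.1).getD []
      if current_line.contains tile_position then
        current_line.foldl (fun (st2 : List Int × List Int) position =>
          if color == "yellow" then
            if position != tile_position then (st2.1, st2.2 ++ [position]) else st2
          else
            if st2.1.contains position then
              ((PySem.List.remove? st2.1 position).getD st2.1, st2.2)
            else st2) st
      else st) (positions, [])
  if color != "yellow" then st.1 else st.2

-- ===== PORT B =====
def determine_letter_pool_allocation_alt (tile_position : Int) (current_tile : List (String × String)) (intersections : List Int) (board_layout : List (String × List Int)) : List Int :=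
  let index : PySem.Dict Int (List String) :=
    board_layout.foldl (fun idx kv =>
      kv.2.foldl (fun idx2 q =>
        let lines : List String := (idx2.get? q).getD []
        if lines.contains kv.1 then idx2 else idx2.insert q (lines ++ [kv.1])) idx)
      PySem.Dict.empty
  let tile_lines : List String := (index.get? tile_position).getD []
  let color : String := ((PySem.Dict.mk current_tile).get? "color").getD ""
  if color == "yellow" then
    tile_lines.flatMap (fun key =>
      (((PySem.Dict.mk board_layout).get? key).getD []).filter (fun p => p != tile_position))
  else
    (PySem.List.pyRange 0 25 1).filter (fun p =>
      !(([6, 8, 16, 18] : List Int).contains p) &&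
      ((index.get? p).getD []).all (fun k => !(tile_lines.contains k)))

-- ===== PRECONDITION & SPEC =====
-- Pre_ excludes (a) inputs with no "color" key in current_tile, on which A raises KeyError, and
-- (b) assoc lists with duplicate board_layout keys, which no Python dict can represent (the dict
-- representation invariant), so they correspond to no input the Python A ever receives.
def Pre_determine_letter_pool_allocation (tile_position : Int) (current_tile : List (String × String)) (intersections : List Int) (board_layout : List (String × List Int)) : Prop :=
  ((PySem.Dict.mk current_tile).get? "color").isSome = true ∧ (board_layout.map Prod.fst).Nodup
instance (tile_position : Int) (current_tile : List (String × String)) (intersections : List Int) (board_layout : List (String × List Int)) : Decidable (Pre_determine_letter_pool_allocation tile_position current_tile intersections board_layout) := by unfold Pre_determine_letter_pool_allocation; infer_instance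
def pvWitness_determine_letter_pool_allocation : Int × (List (String × String)) × List Int × (List (String × List Int)) :=
  (0, [("color", "yellow")], [], [("row", [0, 1, 2]), ("col", [0, 5, 10])])
def Spec_determine_letter_pool_allocation (tile_position : Int) (current_tile : List (String × String)) (intersections : List Int) (board_layout : List (String × List Int)) (out : List Int) : Prop := out = determine_letter_pool_allocation_alt tile_position current_tile intersections board_layout
instance (tile_position : Int) (current_tile : List (String × String)) (intersections : List Int) (board_layout : List (String × List Int)) (out : List Int) : Decidable (Spec_determine_letter_pool_allocation tile_position current_tile intersections board_layout out) := by unfold Spec_determine_letter_pool_allocation; infer_instance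

-- ===== CLAIM (what is proved, stated in full; the proofs are below) =====
def Claim_equal_determine_letter_pool_allocation : Prop := ∀ (tile_position : Int) (current_tile : List (String × String)) (intersections : List Int) (board_layout : List (String × List Int)), Dom_determine_letter_pool_allocation tile_position current_tile intersections board_layout → Pre_determine_letter_pool_allocation tile_position current_tile intersections board_layout → Spec_determine_letter_pool_allocation tile_position current_tile intersections board_layout (determine_letter_pool_allocation tile_position current_tile intersections board_layout)

-- ===== LEMMAS AND PROOFS =====

-- With nodup keys, the lookup `board_layout[key]` returns the pair's own value.
theorem pv_lookup_self (bl : List (String × List Int)) (hn : (bl.map Prod.fst).Nodup) :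
    ∀ kv ∈ bl, (PySem.Dict.mk bl).get? kv.1 = some kv.2 := by
  induction bl with
  | nil => intro kv h; cases h
  | cons hd tl ih =>
    intro kv hkv
    rw [PySem.Dict.get?_mk_cons]
    simp only [List.map_cons, List.nodup_cons] at hn
    cases hkv with
    | head => simp
    | tail _ htl =>
      have hne : (hd.1 == kv.1) ≠ true := by
        intro h
        exact hn.1 (by
          have : hd.1 = kv.1 := by simpa using h
          exact this ▸ List.mem_map_of_mem htl)
      simp only [hne]
      exact ih hn.2 kv htl

-- With nodup keys, two pairs of bl with the same key are the same pair.
theorem pv_key_inj (bl : List (String × List Int)) (hn : (bl.map Prod.fst).Nodup)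
    {kv kv' : String × List Int} (h1 : kv ∈ bl) (h2 : kv' ∈ bl) (hk : kv.1 = kv'.1) :
    kv = kv' := by
  have e1 := pv_lookup_self bl hn kv h1
  have e2 := pv_lookup_self bl hn kv' h2
  rw [hk, e2] at e1
  exact Prod.ext hk (by simpa using e1.symm)

-- A's yellow inner loop appends the line's non-tile positions.
theorem pv_inner_yellow (t : Int) (line : List Int) :
    ∀ st : List Int × List Int,
      line.foldl (fun st2 p => if p != t then (st2.1, st2.2 ++ [p]) else st2) st
        = (st.1, st.2 ++ line.filter (fun p => p != t)) := by
  induction line with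
  | nil => intro st; simp
  | cons p rest ih =>
    intro st
    by_cases h : (p != t) = true
    · simp only [List.foldl_cons, List.filter_cons, h, ih]
      simp
    · simp only [List.foldl_cons, List.filter_cons, h, ih]
      simp at h
      simp

-- A's white inner loop removes the line's members from a nodup accumulator.
theorem pv_inner_white (line : List Int) :
    ∀ st : List Int × List Int, st.1.Nodup →
      line.foldl (fun st2 p =>
          if st2.1.contains p then ((PySem.List.remove? st2.1 p).getD st2.1, st2.2) else st2) st
        = (st.1.filter (fun x => !line.contains x), st.2) := by
  induction line with
  | nil => intro st _; simp
  | cons p rest ih =>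
    intro st hnd
    have hstep : (if st.1.contains p then ((PySem.List.remove? st.1 p).getD st.1, st.2) else st)
        = (st.1.filter (fun x => x != p), st.2) := by
      by_cases h : st.1.contains p = true
      · rw [if_pos h, PySem.List.remove?_eq_some_erase st.1 p (by simpa using h)]
        simp [List.Nodup.erase_eq_filter hnd]
      · rw [if_neg h]
        have hpm : p ∉ st.1 := by simpa using h
        have heq : st.1.filter (fun x => x != p) = st.1 :=
          List.filter_eq_self.2 (fun a ha => bne_iff_ne.2 (fun he => hpm (he ▸ ha)))
        exact Prod.ext (heq.symm ▸ rfl) rfl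
    rw [List.foldl_cons, hstep, ih _ (List.Nodup.filter _ hnd)]
    simp only [List.filter_filter]
    congr 1
    apply List.filter_congr
    intro x _
    by_cases hxp : x = p <;> by_cases hxr : x ∈ rest <;> simp [hxp, hxr]

-- A's outer loop in the yellow case collects the non-tile positions of every matching line.
theorem pv_outer_yellow (t : Int) (bl : List (String × List Int)) :
    ∀ acc : List Int × List Int,
      bl.foldl (fun st kv => if kv.2.contains t then
          kv.2.foldl (fun st2 p => if p != t then (st2.1, st2.2 ++ [p]) else st2) st else st) acc
        = (acc.1, acc.2 ++ ((bl.filter (fun kv => kv.2.contains t)).flatMap (fun kv => kv.2)).filter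
            (fun p => p != t)) := by
  induction bl with
  | nil => intro acc; simp
  | cons hd tl ih =>
    intro acc
    by_cases h : hd.2.contains t = true
    · rw [List.foldl_cons, if_pos h, pv_inner_yellow, ih]
      have hm : t ∈ hd.2 := by simpa using h
      simp [hm, List.filter_append, List.append_assoc]
    · rw [List.foldl_cons, if_neg h, ih]
      have hm : t ∉ hd.2 := by simpa using h
      simp [hm]

-- A's outer loop in the white case filters the matching lines' members out of `positions`.
theorem pv_outer_white (t : Int) (bl : List (String × List Int)) :
    ∀ acc : List Int × List Int, acc.1.Nodup →
      bl.foldl (fun st kv => if kv.2.contains t then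
          kv.2.foldl (fun st2 p =>
            if st2.1.contains p then ((PySem.List.remove? st2.1 p).getD st2.1, st2.2) else st2) st
          else st) acc
        = (acc.1.filter (fun x =>
            !(((bl.filter (fun kv => kv.2.contains t)).flatMap (fun kv => kv.2)).contains x)), acc.2) := by
  induction bl with
  | nil => intro acc _; simp
  | cons hd tl ih =>
    intro acc hnd
    by_cases h : hd.2.contains t = true
    · rw [List.foldl_cons, if_pos h, pv_inner_white _ _ hnd, ih _ (List.Nodup.filter _ hnd)]
      have hm : t ∈ hd.2 := by simpa using h
      simp only [List.filter_filter]
      congr 1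
      rw [List.filter_congr (q := fun x => !((hd.2 ++ (tl.filter (fun kv => kv.2.contains t)).flatMap (fun kv => kv.2)).contains x))]
      · simp [hm]
      · intro x _
        by_cases h1 : x ∈ hd.2 <;> by_cases h2 : x ∈ (tl.filter (fun kv => kv.2.contains t)).flatMap (fun kv => kv.2) <;>
          simp [h1]
    · rw [List.foldl_cons, if_neg h, ih _ hnd]
      have hm : t ∉ hd.2 := by simpa using h
      simp [hm]

-- B's inner index loop: one line with a fresh-or-already-recorded key.
theorem pv_idx_inner (key : String) (base : Int → List String) (hk : ∀ p, key ∉ base p)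
    (l : List Int) :
    ∀ idx : PySem.Dict Int (List String),
      (∀ p, (idx.get? p).getD [] = base p ∨ (idx.get? p).getD [] = base p ++ [key]) →
      ∀ p, ((l.foldl (fun idx2 q =>
              let lines : List String := (idx2.get? q).getD []
              if lines.contains key then idx2 else idx2.insert q (lines ++ [key])) idx).get? p).getD []
        = if p ∈ l then base p ++ [key] else (idx.get? p).getD [] := by
  induction l with
  | nil => intro idx _ p; simp
  | cons q rest ih =>
    intro idx hinv p
    rw [List.foldl_cons]
    rcases hinv q with hq | hq
    · have hg : (((idx.get? q).getD []).contains key) = false := by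
        rw [hq]; simpa using hk q
      simp only [hg, Bool.false_eq_true, if_false]
      have hinv2 : ∀ r, (((idx.insert q ((idx.get? q).getD [] ++ [key])).get? r).getD [] : List String) = base r ∨
          (((idx.insert q ((idx.get? q).getD [] ++ [key])).get? r).getD [] : List String) = base r ++ [key] := by
        intro r
        rw [PySem.Dict.get?_insert]
        by_cases hr : r = q
        · simp [hr, hq]
        · simp only [hr, if_false]
          exact hinv r
      rw [ih _ hinv2 p]
      rw [PySem.Dict.get?_insert]
      by_cases hpr : p ∈ rest
      · simp [hpr]
      · by_cases hpq : p = q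
        · simp [hpr, hpq, hq]
        · simp [hpr, hpq]
    · have hg : (((idx.get? q).getD []).contains key) = true := by
        rw [hq]; simp
      simp only [hg, if_true]
      rw [ih _ hinv p]
      by_cases hpr : p ∈ rest
      · simp [hpr]
      · by_cases hpq : p = q
        · simp [hpr, hpq, hq]
        · simp [hpr, hpq]

-- B's outer index loop: the index maps each position to the keys of the lines containing it.
theorem pv_idx_outer (bl : List (String × List Int)) (hn : (bl.map Prod.fst).Nodup) :
    ∀ (idx : PySem.Dict Int (List String)) (base : Int → List String),
      (∀ p, (idx.get? p).getD [] = base p) →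
      (∀ p k, k ∈ base p → k ∉ bl.map Prod.fst) →
      ∀ p, ((bl.foldl (fun idx kv =>
              kv.2.foldl (fun idx2 q =>
                let lines : List String := (idx2.get? q).getD []
                if lines.contains kv.1 then idx2 else idx2.insert q (lines ++ [kv.1])) idx) idx).get? p).getD []
        = base p ++ (bl.filter (fun kv => kv.2.contains p)).map Prod.fst := by
  induction bl with
  | nil => intro idx base hbase _ p; simp [hbase]
  | cons kv tl ih =>
    simp only [List.map_cons, List.nodup_cons] at hn
    intro idx base hbase hfresh p
    rw [List.foldl_cons]
    have hk : ∀ r, kv.1 ∉ base r := by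
      intro r hmem
      exact hfresh r kv.1 hmem (by simp)
    have hinner := pv_idx_inner kv.1 base hk kv.2 idx
      (fun r => Or.inl (hbase r))
    have hbase' : ∀ r, (((kv.2.foldl (fun idx2 q =>
          let lines : List String := (idx2.get? q).getD []
          if lines.contains kv.1 then idx2 else idx2.insert q (lines ++ [kv.1])) idx).get? r).getD [] : List String)
        = (fun r => if r ∈ kv.2 then base r ++ [kv.1] else base r) r := by
      intro r
      rw [hinner r]
      by_cases hr : r ∈ kv.2 <;> simp [hr, hbase r]
    have hfresh' : ∀ r k, k ∈ (fun r => if r ∈ kv.2 then base r ++ [kv.1] else base r) r →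
        k ∉ tl.map Prod.fst := by
      intro r k hmem
      by_cases hr : r ∈ kv.2
      · simp only [hr, if_true, List.mem_append, List.mem_singleton] at hmem
        rcases hmem with hmem | hmem
        · intro ht; exact hfresh r k hmem (by simp [ht])
        · rw [hmem]; exact hn.1
      · simp only [hr, if_false] at hmem
        intro ht; exact hfresh r k hmem (by simp [ht])
    rw [ih hn.2 _ _ hbase' hfresh' p]
    by_cases hp : p ∈ kv.2
    · have hc : kv.2.contains p = true := by simpa using hp
      simp [hp, hc, List.filter_cons, List.append_assoc]
    · have hc : kv.2.contains p = false := by simpa using hp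
      simp [hp, hc, List.filter_cons]

-- A flatMap respects pointwise equality on members.
theorem pv_flatMap_congr {α β : Type} {l : List α} {f g : α → List β}
    (h : ∀ a ∈ l, f a = g a) : l.flatMap f = l.flatMap g := by
  induction l with
  | nil => rfl
  | cons a tl ih =>
    simp only [List.flatMap_cons, h a (by simp)]
    rw [ih (fun a ha => h a (by simp [ha]))]

-- The flatMap of a filter over a map of first components, with nodup keys, is the flatMap of the filter.
theorem pv_filter_flatMap {α β : Type} (l : List α) (f : α → List β) (p : β → Bool) :
    (l.flatMap f).filter p = l.flatMap (fun a => (f a).filter p) := by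
  induction l with
  | nil => rfl
  | cons a tl ih => simp [List.flatMap_cons, List.filter_append, ih]

-- The membership test "p occurs in some line containing t" matches B's disjointness test.
theorem pv_members_contains (bl : List (String × List Int)) (hn : (bl.map Prod.fst).Nodup)
    (t p : Int) :
    (!(((bl.filter (fun kv => kv.2.contains t)).flatMap (fun kv => kv.2)).contains p))
      = ((bl.filter (fun kv => kv.2.contains p)).map Prod.fst).all
          (fun k => !(((bl.filter (fun kv => kv.2.contains t)).map Prod.fst).contains k)) := by
  rw [Bool.eq_iff_iff]
  simp only [Bool.not_eq_eq_eq_not, Bool.not_true, Bool.not_eq_true', List.contains_eq_mem,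
    decide_eq_false_iff_not, decide_eq_true_eq, List.all_eq_true, List.mem_map, List.mem_filter,
    List.mem_flatMap]
  constructor
  · rintro h k ⟨kv, ⟨hkv, hkvp⟩, rfl⟩ ⟨kv', ⟨hkv', hkv't⟩, hkk⟩
    have heq : kv' = kv := pv_key_inj bl hn hkv' hkv hkk
    subst heq
    exact h ⟨kv', ⟨hkv', hkv't⟩, hkvp⟩
  · rintro h ⟨kv, ⟨hkv, hkvt⟩, hq⟩
    exact h kv.1 ⟨kv, ⟨hkv, hq⟩, rfl⟩ ⟨kv, ⟨hkv, hkvt⟩, rfl⟩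

-- ===== VERDICT (by name: the statement is the Claim_ definition above) =====
theorem determine_letter_pool_allocation_spec : Claim_equal_determine_letter_pool_allocation := by
  intro t ct its bl _ hpre
  obtain ⟨-, hnod⟩ := hpre
  unfold Spec_determine_letter_pool_allocation determine_letter_pool_allocation determine_letter_pool_allocation_alt
  set color := ((PySem.Dict.mk ct).get? "color").getD "" with hcolor
  set positions : List Int :=
    (PySem.List.pyRange 0 25 1).filter (fun i => !(([6, 8, 16, 18] : List Int).contains i)) with hpos
  have hposnd : positions.Nodup := by rw [hpos]; decide
  -- characterization of B's index
  have hidx : ∀ p : Int,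
      (((bl.foldl (fun idx kv =>
          kv.2.foldl (fun idx2 q =>
            let lines : List String := (idx2.get? q).getD []
            if lines.contains kv.1 then idx2 else idx2.insert q (lines ++ [kv.1])) idx)
          PySem.Dict.empty).get? p).getD [] : List String)
        = (bl.filter (fun kv => kv.2.contains p)).map Prod.fst := by
    intro p
    have h := pv_idx_outer bl hnod PySem.Dict.empty (fun _ => [])
      (fun r => by simp) (fun r k hk => absurd hk (List.not_mem_nil)) p
    simpa using h
  -- A's dict-lookup of each key is the pair's own value
  have hfold : ∀ (f : List Int × List Int → List Int → List Int × List Int) (init : List Int × List Int),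
      bl.foldl (fun st kv =>
        let current_line : List Int := ((PySem.Dict.mk bl).get? kv.1).getD []
        if current_line.contains t then f st current_line else st) init
      = bl.foldl (fun st kv => if kv.2.contains t then f st kv.2 else st) init := by
    intro f init
    apply PySem.List.foldl_congr_mem
    intro acc kv hkv
    simp [pv_lookup_self bl hnod kv hkv]
  by_cases hy : (color == "yellow") = true
  · have hbne : (color != "yellow") = false := by simp [bne, hy]
    simp only [hy, if_true, hbne, Bool.false_eq_true, if_false]
    have h1 := hfold (fun st line => line.foldl
        (fun st2 p => if p != t then (st2.1, st2.2 ++ [p]) else st2) st) (positions, [])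
    simp only [] at h1
    rw [h1, pv_outer_yellow, hidx t]
    have hmap : ((bl.filter (fun kv => kv.2.contains t)).map Prod.fst).flatMap
        (fun key => (((PySem.Dict.mk bl).get? key).getD []).filter (fun p => p != t))
        = (bl.filter (fun kv => kv.2.contains t)).flatMap
            (fun kv => kv.2.filter (fun p => p != t)) := by
      rw [List.flatMap_map]
      apply pv_flatMap_congr
      intro kv hkv
      have hkvbl : kv ∈ bl := (List.mem_filter.1 hkv).1
      simp [Function.comp, pv_lookup_self bl hnod kv hkvbl]
    rw [hmap, pv_filter_flatMap]
    simp
  · have hbne : (color != "yellow") = true := by simp [bne]; simpa using hy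
    have hy' : (color == "yellow") = false := by simpa using hy
    simp only [hy', Bool.false_eq_true, if_false, hbne, if_true]
    have h1 := hfold (fun st line => line.foldl
        (fun st2 p => if st2.1.contains p then ((PySem.List.remove? st2.1 p).getD st2.1, st2.2) else st2) st)
        (positions, [])
    simp only [] at h1
    rw [h1, pv_outer_white t bl (positions, []) hposnd]
    rw [hpos, List.filter_filter]
    apply List.filter_congr
    intro x _
    rw [hidx x, hidx t, pv_members_contains bl hnod t x, Bool.and_comm]
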